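-- pv_equiv track=rewrite | github.com/ailiskab-hub/pronufa | my_tools/protein_tool.py | determine_total_protein_charge
-- ===== SOURCE A (Python) =====
-- from collections import Counter
--
-- NEG_CHARGED = ['D', 'E']
--
-- POS_CHARGED = ['H', 'K', 'R']
--
-- def determine_total_protein_charge(seq) -> str:
--     """
--     Determine whether the protein has positive, negative or neutral charge in neutral pH
--
--     Arguments:
--     - seq (str): amino acid sequence. The input must be uppercased and use the single letter amino acid code
--
--     Returns:
--     - output (str): positive, negative or neutral charge of protein in neutral pH
--     """
--     seq_list = list(seq.strip())
--     aa_cnt = Counter(seq_list)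
--     number_of_pos = sum([aa_cnt[aa] for aa in POS_CHARGED])
--     number_of_neg = sum([aa_cnt[aa] for aa in NEG_CHARGED])
--     if number_of_pos == number_of_neg:
--         return 'neutral'
--     return 'positive' if number_of_pos > number_of_neg else 'negative'
-- ===== SOURCE B (Python) =====
-- NEG_CHARGED = ['D', 'E']
--
-- POS_CHARGED = ['H', 'K', 'R']
--
-- def determine_total_protein_charge(seq) -> str:
--     net = 0
--     for aa in seq.strip():
--         if aa in POS_CHARGED:
--             net += 1
--         elif aa in NEG_CHARGED:
--             net -= 1
--     if net == 0:
--         return 'neutral'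
--     return 'positive' if net > 0 else 'negative'
-- ===== Notes on version B (the rewrite author's own statement) =====
-- stated objective: simpler
-- what changed: Replaces the Counter frequency table plus two fixed-subset sums with a single running net-charge accumulator (+1 for H/K/R, -1 for D/E) over the stripped sequence, compared to zero at the end.
import Mathlib
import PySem

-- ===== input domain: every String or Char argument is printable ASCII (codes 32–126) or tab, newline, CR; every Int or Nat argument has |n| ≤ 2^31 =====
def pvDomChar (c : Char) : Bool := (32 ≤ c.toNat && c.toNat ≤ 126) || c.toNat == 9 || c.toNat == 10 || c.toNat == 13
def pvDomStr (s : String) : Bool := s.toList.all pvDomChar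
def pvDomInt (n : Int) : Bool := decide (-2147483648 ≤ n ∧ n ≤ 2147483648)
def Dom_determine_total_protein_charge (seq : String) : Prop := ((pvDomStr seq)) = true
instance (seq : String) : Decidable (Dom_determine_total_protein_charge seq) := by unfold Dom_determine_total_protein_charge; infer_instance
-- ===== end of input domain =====

-- B replaces A's Counter table + two subset sums with one running net-charge accumulator; objective: simpler.

-- ===== PORT A =====
def pvNegCharged : List Char := ['D', 'E']
def pvPosCharged : List Char := ['H', 'K', 'R']

def determine_total_protein_charge (seq : String) : String :=
  let seq_list := (PySem.Str.strip seq).toList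
  let aa_cnt := PySem.Dict.counter seq_list
  let number_of_pos := ((pvPosCharged.map (fun aa => aa_cnt.getD aa 0)).sum : Int)
  let number_of_neg := ((pvNegCharged.map (fun aa => aa_cnt.getD aa 0)).sum : Int)
  if number_of_pos = number_of_neg then "neutral"
  else if number_of_pos > number_of_neg then "positive" else "negative"

-- ===== PORT B =====
def determine_total_protein_charge_alt (seq : String) : String :=
  let net := (PySem.Str.strip seq).toList.foldl
    (fun net aa =>
      if aa ∈ pvPosCharged then net + 1
      else if aa ∈ pvNegCharged then net - 1
      else net) (0 : Int)
  if net = 0 then "neutral"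
  else if net > 0 then "positive" else "negative"

-- ===== PRECONDITION & SPEC =====
def Spec_determine_total_protein_charge (seq : String) (out : String) : Prop := out = determine_total_protein_charge_alt seq
instance (seq : String) (out : String) : Decidable (Spec_determine_total_protein_charge seq out) := by unfold Spec_determine_total_protein_charge; infer_instance

-- ===== CLAIM (what is proved, stated in full; the proofs are below) =====
def Claim_equal_determine_total_protein_charge : Prop := ∀ (seq : String), Dom_determine_total_protein_charge seq → Spec_determine_total_protein_charge seq (determine_total_protein_charge seq)

-- ===== LEMMAS AND PROOFS =====

-- the net accumulator equals (#pos residues) − (#neg residues)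
theorem pv_net_fold (l : List Char) (a : Int) :
    l.foldl (fun net aa =>
      if aa ∈ pvPosCharged then net + 1
      else if aa ∈ pvNegCharged then net - 1
      else net) a
    = a + ((l.count 'H' : Int) + l.count 'K' + l.count 'R')
        - ((l.count 'D' : Int) + l.count 'E') := by
  induction l generalizing a with
  | nil => simp
  | cons x xs ih =>
    rw [List.foldl_cons]
    by_cases hH : x = 'H'
    · subst hH; rw [if_pos (by simp [pvPosCharged]), ih]
      simp [List.count_cons]; ring
    by_cases hK : x = 'K'
    · subst hK; rw [if_pos (by simp [pvPosCharged]), ih]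
      simp [List.count_cons]; ring
    by_cases hR : x = 'R'
    · subst hR; rw [if_pos (by simp [pvPosCharged]), ih]
      simp [List.count_cons]; ring
    by_cases hD : x = 'D'
    · subst hD
      rw [if_neg (by simp [pvPosCharged]), if_pos (by simp [pvNegCharged]), ih]
      simp [List.count_cons]; ring
    by_cases hE : x = 'E'
    · subst hE
      rw [if_neg (by simp [pvPosCharged]), if_pos (by simp [pvNegCharged]), ih]
      simp [List.count_cons]; ring
    · rw [if_neg (by simp [pvPosCharged, hH, hK, hR]),
        if_neg (by simp [pvNegCharged, hD, hE]), ih]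
      simp [List.count_cons, hH, hK, hR, hD, hE]

-- ===== VERDICT (by name: the statement is the Claim_ definition above) =====
theorem determine_total_protein_charge_spec : Claim_equal_determine_total_protein_charge := by
  intro seq _
  simp only [Spec_determine_total_protein_charge, determine_total_protein_charge,
    determine_total_protein_charge_alt]
  rw [pv_net_fold]
  simp only [pvPosCharged, pvNegCharged, List.map_cons, List.map_nil, List.sum_cons,
    List.sum_nil, PySem.Dict.getD_counter]
  split_ifs <;> first | rfl | omega
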